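-- pv_equiv track=rewrite | github.com/kseniia-strelbytska/discrete-diffusion | data_generation.py | satisfies_rule_2
-- ===== SOURCE A (Python) =====
-- def satisfies_rule_2(seq):
--     if len(seq) == 1:
--         return False
--
--     if seq[0] != seq[1] or seq[-1] != seq[-2]:
--         return False
--
--     for i in range(1, len(seq) - 1):
--         if seq[i] != seq[i - 1] and seq[i] != seq[i + 1]:
--             return False
--
--     return True
-- ===== SOURCE B (Python) =====
-- def satisfies_rule_2(seq):
--     # Run-length decomposition: collect the length of each maximal run of equal
--     # consecutive values; an isolated element is exactly a run of length 1.
--     lengths = []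
--     i = 0
--     n = len(seq)
--     while i < n:
--         run = 1
--         while i + run < n and seq[i + run] == seq[i]:
--             run += 1
--         lengths.append(run)
--         i += run
--     return all(l >= 2 for l in lengths)
-- ===== Notes on version B (the rewrite author's own statement) =====
-- stated objective: alternative
-- what changed: Replaces A's index-based adjacency scan (with separate endpoint checks) by a run-length decomposition: build the lengths of maximal runs of equal consecutive values, then return True iff every run length is >= 2.
import Mathlib
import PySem

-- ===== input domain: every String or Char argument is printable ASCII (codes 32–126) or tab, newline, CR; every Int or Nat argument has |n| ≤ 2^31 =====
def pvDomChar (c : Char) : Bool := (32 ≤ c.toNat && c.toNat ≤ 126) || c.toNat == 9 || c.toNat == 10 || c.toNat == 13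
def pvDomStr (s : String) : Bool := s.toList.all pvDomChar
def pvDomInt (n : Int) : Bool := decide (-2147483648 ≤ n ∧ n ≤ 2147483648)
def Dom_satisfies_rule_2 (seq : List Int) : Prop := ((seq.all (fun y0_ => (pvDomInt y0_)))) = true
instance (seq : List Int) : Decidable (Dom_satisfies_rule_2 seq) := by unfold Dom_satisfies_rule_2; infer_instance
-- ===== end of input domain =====

-- B replaces A's index-based adjacency scan by a run-length decomposition (alternative algorithm,
-- same cost); Pre_ excludes only the empty list, where A raises IndexError.

-- ===== PORT A =====
def satisfies_rule_2 (seq : List Int) : Bool :=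
  if seq.length == 1 then false
  else if (PySem.List.pyGetD seq 0 0 != PySem.List.pyGetD seq 1 0)
       || (PySem.List.pyGetD seq (-1) 0 != PySem.List.pyGetD seq (-2) 0) then false
  else
    (PySem.List.pyRange 1 ((seq.length : Int) - 1) 1).all (fun i =>
      !((PySem.List.pyGetD seq i 0 != PySem.List.pyGetD seq (i - 1) 0) &&
        (PySem.List.pyGetD seq i 0 != PySem.List.pyGetD seq (i + 1) 0)))

-- ===== PORT B =====
-- lengths of the maximal runs of equal consecutive values (Source B's outer while loop)
def pvRunLengths (seq : List Int) : List Nat :=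
  match seq with
  | [] => []
  | x :: rest =>
      (1 + (rest.takeWhile (fun y => y == x)).length) ::
        pvRunLengths (rest.dropWhile (fun y => y == x))
termination_by seq.length
decreasing_by
  simp only [List.length_cons]
  exact Nat.lt_succ_of_le (List.length_dropWhile_le _ _)

def satisfies_rule_2_alt (seq : List Int) : Bool :=
  (pvRunLengths seq).all (fun l => 2 ≤ l)

-- ===== PRECONDITION & SPEC =====
-- Pre_ excludes only the empty list, on which the Python A raises IndexError (seq[0]).
def Pre_satisfies_rule_2 (seq : List Int) : Prop := seq ≠ []
instance (seq : List Int) : Decidable (Pre_satisfies_rule_2 seq) := by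
  unfold Pre_satisfies_rule_2; infer_instance

def pvWitness_satisfies_rule_2 : List Int := [1, 1, 2, 2]

def Spec_satisfies_rule_2 (seq : List Int) (out : Bool) : Prop := out = satisfies_rule_2_alt seq
instance (seq : List Int) (out : Bool) : Decidable (Spec_satisfies_rule_2 seq out) := by
  unfold Spec_satisfies_rule_2; infer_instance

-- ===== CLAIM (what is proved, stated in full; the proofs are below) =====
def Claim_equal_satisfies_rule_2 : Prop := ∀ (seq : List Int), Dom_satisfies_rule_2 seq → Pre_satisfies_rule_2 seq → Spec_satisfies_rule_2 seq (satisfies_rule_2 seq)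


-- ===== LEMMAS AND PROOFS =====

-- a one-pass scan both programs are reduced to: pvGo prev ok rest, ok = "prev already has an equal neighbour"
def pvGo (prev : Int) (ok : Bool) : List Int → Bool
  | [] => ok
  | x :: xs => if x == prev then pvGo x true xs else ok && pvGo x false xs

-- "last two elements equal" (trivially true for short lists)
def pvLp : List Int → Bool
  | [a, b] => b == a
  | _ :: b :: t => pvLp (b :: t)
  | _ => true

-- interior window condition: every interior element equals a neighbour
def pvWa : List Int → Bool
  | a :: b :: c :: t => ((b == a) || (b == c)) && pvWa (b :: c :: t)
  | _ => true

theorem pvGo_cons (prev : Int) (ok : Bool) (x : Int) (xs : List Int) :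
    pvGo prev ok (x :: xs) = if x == prev then pvGo x true xs else ok && pvGo x false xs := rfl

theorem pvLp_cons3 (a b c : Int) (t : List Int) : pvLp (a :: b :: c :: t) = pvLp (b :: c :: t) := rfl

theorem pvWa_cons3 (a b c : Int) (t : List Int) :
    pvWa (a :: b :: c :: t) = (((b == a) || (b == c)) && pvWa (b :: c :: t)) := rfl

theorem pvRunLengths_cons (x : Int) (rest : List Int) :
    pvRunLengths (x :: rest)
      = (1 + (rest.takeWhile (fun y => y == x)).length) ::
          pvRunLengths (rest.dropWhile (fun y => y == x)) := by
  rw [pvRunLengths]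

theorem pvGo_eq_run (ys : List Int) :
    (∀ x, pvGo x true ys = (pvRunLengths (ys.dropWhile (fun y => y == x))).all (fun l => 2 ≤ l)) ∧
    (∀ x, pvGo x false ys = (pvRunLengths (x :: ys)).all (fun l => 2 ≤ l)) := by
  induction ys with
  | nil =>
    constructor <;> intro x
    · simp [pvGo, pvRunLengths]
    · rw [pvRunLengths_cons]
      simp [pvGo, pvRunLengths]
  | cons y t ih =>
    constructor <;> intro x
    · by_cases h : y = x
      · subst h
        rw [pvGo_cons]
        simp only [beq_self_eq_true, if_pos, List.dropWhile_cons_of_pos]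
        exact ih.1 y
      · have hb : (y == x) = false := by simp [h]
        rw [pvGo_cons, hb, List.dropWhile_cons_of_neg (by simp [hb])]
        simp only [Bool.false_eq_true, if_false, Bool.true_and]
        exact ih.2 y
    · rw [pvGo_cons, pvRunLengths_cons, List.all_cons]
      by_cases h : y = x
      · subst h
        simp only [beq_self_eq_true, if_pos]
        rw [ih.1 y, List.takeWhile_cons_of_pos (by simp), List.dropWhile_cons_of_pos (by simp)]
        simp
        intro _
        omega
      · have hb : (y == x) = false := by simp [h]
        rw [hb, List.takeWhile_cons_of_neg (by simp [hb])]
        simp only [Bool.false_eq_true, if_false, Bool.false_and, List.length_nil]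
        simp

theorem pvLp_cons_cons_self (y : Int) (t : List Int) : pvLp (y :: y :: t) = pvLp (y :: t) := by
  cases t <;> simp [pvLp]

theorem pvWa_cons_cons_self (y : Int) (t : List Int) : pvWa (y :: y :: t) = pvWa (y :: t) := by
  cases t <;> simp [pvWa]

theorem pvLpWa_eq_go (t : List Int) :
    ∀ prev, (pvLp (prev :: t) && pvWa (prev :: t)) = pvGo prev true t := by
  induction t with
  | nil => intro prev; simp [pvLp, pvWa, pvGo]
  | cons z t' ih =>
    intro prev
    cases t' with
    | nil => by_cases h : z = prev <;> simp [pvLp, pvWa, pvGo, h]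
    | cons c t'' =>
      rw [pvGo_cons]
      by_cases h : z = prev
      · subst h
        simp only [beq_self_eq_true, if_pos]
        rw [← ih z, pvLp_cons_cons_self, pvWa_cons_cons_self]
      · have hb : (z == prev) = false := by simp [h]
        rw [hb]
        simp only [Bool.false_eq_true, if_false, Bool.true_and]
        rw [pvGo_cons, pvLp_cons3, pvWa_cons3]
        by_cases hc : c = z
        · rw [if_pos (by simp [hc])]
          have := ih z
          rw [pvGo_cons, if_pos (by simp [hc])] at this
          rw [← this]
          simp [hc]
        · rw [if_neg (by simp [hc])]
          have hcz : ¬ z = c := fun e => hc e.symm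
          have hzc : (z == c) = false := by simp [hcz]
          rw [hb, hzc]
          simp

-- index-window condition over a Nat range equals pvWa
theorem pvWindow_range (seq : List Int) :
    ((List.range (seq.length - 2)).all (fun k =>
      !((seq.getD (k + 1) 0 != seq.getD k 0) && (seq.getD (k + 1) 0 != seq.getD (k + 2) 0))))
    = pvWa seq := by
  induction seq with
  | nil => simp [pvWa]
  | cons a t ih =>
    cases t with
    | nil => simp [pvWa]
    | cons b t' =>
      cases t' with
      | nil => simp [pvWa]
      | cons c t'' =>
        have hlen : (a :: b :: c :: t'').length - 2 = ((b :: c :: t'').length - 2) + 1 := by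
          simp
        rw [hlen, List.range_succ_eq_map, List.all_cons, List.all_map, pvWa_cons3]
        rw [← ih]
        congr 1
        · show (!(((a :: b :: c :: t'').getD (0 + 1) 0 != (a :: b :: c :: t'').getD 0 0) &&
            ((a :: b :: c :: t'').getD (0 + 1) 0 != (a :: b :: c :: t'').getD (0 + 2) 0)))
            = ((b == a) || (b == c))
          rw [Bool.eq_iff_iff]
          simp [List.getD]

-- last-two-equal in getD form equals pvLp
theorem pvLp_eq_getD (t : List Int) : ∀ a b : Int,
    pvLp (a :: b :: t) = ((a :: b :: t).getD (t.length + 1) 0 == (a :: b :: t).getD t.length 0) := by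
  induction t with
  | nil => intro a b; simp [pvLp, List.getD]
  | cons c t' ih =>
    intro a b
    rw [show pvLp (a :: b :: c :: t') = pvLp (b :: c :: t') from rfl, ih b c]
    have e1 : (a :: b :: c :: t').getD ((c :: t').length + 1) 0 = (b :: c :: t').getD (t'.length + 1) 0 := by
      rw [show (c :: t').length + 1 = (t'.length + 1) + 1 from by simp, List.getD_cons_succ]
    have e2 : (a :: b :: c :: t').getD ((c :: t').length) 0 = (b :: c :: t').getD t'.length 0 := by
      rw [show (c :: t').length = t'.length + 1 from by simp, List.getD_cons_succ]
    rw [e1, e2]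

-- A's port on a list of length ≥ 2 equals firstPair && pvLp && pvWa
theorem pvA_eq (x y : Int) (t : List Int) :
    satisfies_rule_2 (x :: y :: t)
      = (((x == y) && pvLp (x :: y :: t)) && pvWa (x :: y :: t)) := by
  unfold satisfies_rule_2
  have h1 : ((x :: y :: t).length == 1) = false := by simp
  rw [h1]
  simp only [Bool.false_eq_true, if_false]
  have hg0 : PySem.List.pyGetD (x :: y :: t) 0 0 = x := by
    simp [PySem.List.pyGetD_zero_cons]
  have hg1 : PySem.List.pyGetD (x :: y :: t) 1 0 = y := by
    rw [show (1 : Int) = ((1 : Nat) : Int) from rfl, PySem.List.pyGetD_natCast]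
    simp [List.getD]
  have hgm1 : PySem.List.pyGetD (x :: y :: t) (-1) 0 = (x :: y :: t).getD (t.length + 1) 0 := by
    rw [PySem.List.pyGetD_neg_ofNat _ 1 _ (by omega) (by simp)]
    rw [List.getD_eq_getElem _ _ (by simp)]
    exact getElem_congr_idx (by simp)
  have hgm2 : PySem.List.pyGetD (x :: y :: t) (-2) 0 = (x :: y :: t).getD t.length 0 := by
    rw [PySem.List.pyGetD_neg_ofNat _ 2 _ (by omega) (by simp)]
    rw [List.getD_eq_getElem _ _ (by simp)]
    exact getElem_congr_idx (by simp)
  rw [hg0, hg1, hgm1, hgm2]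
  have hrange : ((PySem.List.pyRange 1 (((x :: y :: t).length : Int) - 1) 1).all (fun i =>
      !((PySem.List.pyGetD (x :: y :: t) i 0 != PySem.List.pyGetD (x :: y :: t) (i - 1) 0) &&
        (PySem.List.pyGetD (x :: y :: t) i 0 != PySem.List.pyGetD (x :: y :: t) (i + 1) 0))))
      = pvWa (x :: y :: t) := by
    rw [PySem.List.pyRange_one, List.all_map, ← pvWindow_range (x :: y :: t)]
    have hn : ((((x :: y :: t).length : Int) - 1) - 1).toNat = (x :: y :: t).length - 2 := by
      simp
    rw [hn]
    congr 1
    funext k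
    have e2 : (1 : Int) + (k : Int) - 1 = ((k : Nat) : Int) := by omega
    have e3 : (1 : Int) + (k : Int) + 1 = ((k + 2 : Nat) : Int) := by omega
    have e1 : (1 : Int) + (k : Int) = ((k + 1 : Nat) : Int) := by omega
    simp only [Function.comp_apply]
    simp only [e2, e3]
    simp only [e1]
    simp only [PySem.List.pyGetD_natCast]
  rw [hrange, pvLp_eq_getD t x y]
  rw [Bool.eq_iff_iff]
  by_cases hxy : x = y <;>
    by_cases hlp : (x :: y :: t).getD (t.length + 1) 0 = (x :: y :: t).getD t.length 0 <;>
    simp [hxy]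

-- ===== VERDICT (by name: the statement is the Claim_ definition above) =====
theorem satisfies_rule_2_spec : Claim_equal_satisfies_rule_2 := by
  intro seq _ hpre
  unfold Spec_satisfies_rule_2
  match seq with
  | [] => exact absurd rfl hpre
  | [x] =>
    rw [show satisfies_rule_2_alt [x] = (pvRunLengths [x]).all (fun l => 2 ≤ l) from rfl,
      pvRunLengths_cons]
    simp [satisfies_rule_2, pvRunLengths]
  | x :: y :: t =>
    rw [pvA_eq x y t]
    have hB : satisfies_rule_2_alt (x :: y :: t) = pvGo x false (y :: t) :=
      Eq.symm ((pvGo_eq_run (y :: t)).2 x)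
    rw [hB, pvGo_cons]
    by_cases h : y = x
    · subst h
      simp only [beq_self_eq_true, if_pos]
      rw [← pvLpWa_eq_go t y, pvLp_cons_cons_self, pvWa_cons_cons_self]
      simp
    · have hb : (y == x) = false := by simp [h]
      have h' : ¬ x = y := fun e => h e.symm
      have hxy : (x == y) = false := by simp [h']
      rw [hb, hxy]
      simp
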